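-- pv_equiv track=rewrite | github.com/clairefan816/PythonExcercises | hw12/gamecontroller/score.py | list_score
-- ===== SOURCE A (Python) =====
-- def list_score(l):
--     score = 0
--     for n in range(len(l) - 1):
--         if l[n:n+2] == [2, 2]:
--             score += 50
--     for n in range(len(l) - 2):
--         if l[n:n+3] == [1, 2, 1]:
--             score -= 100
--     for n in range(len(l) - 3):
--         if l[n:n+4] == [1, 2, 2, 1]:
--             score -= 100
--         elif l[n:n+4] == [2, 1, 1, 0] or l[n:n+4] == [0, 1, 1, 2]:
--             score += 500
--         elif l[n:n+4] == [1, 1, 1, 2] or l[n:n+4] == [2, 1, 1, 1]: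
--             score += 9000
--         elif l[n:n+4] == [2, 2, 2, 2]:
--             score += 10000
--         elif l[n:n+4] == [0, 2, 2, 2] or l[n:n+4] == [2, 2, 2, 0]:
--             score += 800
--     for n in range(len(l) - 4):
--         if l[n:n+5] == [0, 2, 2, 2, 0]:
--             score += 900
--         elif l[n:n+5] == [1, 2, 2, 2, 1]:
--             score -= 100
--     return score
-- ===== SOURCE B (Python) =====
-- # Streaming state machine: one pass with four shift registers holding the last
-- # four normalized symbols; each new element scores all patterns ENDING there
-- # (A rescans the list four times, slicing windows that START at each index).
-- _PTS = {
--     (2, 2): 50,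
--     (1, 2, 1): -100,
--     (1, 2, 2, 1): -100, (2, 1, 1, 0): 500, (0, 1, 1, 2): 500,
--     (1, 1, 1, 2): 9000, (2, 1, 1, 1): 9000, (2, 2, 2, 2): 10000,
--     (0, 2, 2, 2): 800, (2, 2, 2, 0): 800,
--     (0, 2, 2, 2, 0): 900, (1, 2, 2, 2, 1): -100,
-- }
--
-- def list_score(l):
--     score = 0
--     a = b = c = d = -1   # last four normalized symbols; -1 = out of alphabet / before start
--     for x in l:
--         e = x if 0 <= x <= 2 else -1
--         score += (_PTS.get((d, e), 0) + _PTS.get((c, d, e), 0)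
--                   + _PTS.get((b, c, d, e), 0) + _PTS.get((a, b, c, d, e), 0))
--         a, b, c, d = b, c, d, e
--     return score
-- ===== Notes on version B (the rewrite author's own statement) =====
-- stated objective: faster
-- what changed: Replaced A's four index-and-slice scans (windows starting at each index, hard-coded if/elif chains) by a single streaming pass holding the last four normalized symbols in shift registers and scoring every pattern ending at the current element via one pattern-to-score table; no indexing, slicing or per-window list allocation remains.
import Mathlib
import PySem

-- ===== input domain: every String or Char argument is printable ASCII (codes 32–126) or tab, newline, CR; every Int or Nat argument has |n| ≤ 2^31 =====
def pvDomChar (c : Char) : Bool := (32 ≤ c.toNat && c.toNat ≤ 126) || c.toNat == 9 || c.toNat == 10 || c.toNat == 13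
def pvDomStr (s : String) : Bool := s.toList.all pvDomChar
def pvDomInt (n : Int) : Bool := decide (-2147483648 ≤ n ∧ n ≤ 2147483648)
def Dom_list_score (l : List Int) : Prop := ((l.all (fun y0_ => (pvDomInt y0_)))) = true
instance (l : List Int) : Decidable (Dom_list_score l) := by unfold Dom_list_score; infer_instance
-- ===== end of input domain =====

-- B replaces A's four index-and-slice scans by a single streaming pass with four
-- shift registers (last normalized symbols) scoring patterns ending at each element
-- (objective: alternative).


-- ===== PORT A =====
-- literal transliteration of A: four index loops, each slicing l[n:n+k]
def list_score (l : List Int) : Int :=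
  let L : Int := (l.length : Int)
  let s1 := (PySem.List.pyRange 0 (L - 1) 1).foldl
    (fun score n =>
      if PySem.List.slice l (some n) (some (n + 2)) = [2, 2] then score + 50 else score) 0
  let s2 := (PySem.List.pyRange 0 (L - 2) 1).foldl
    (fun score n =>
      if PySem.List.slice l (some n) (some (n + 3)) = [1, 2, 1] then score - 100 else score) s1
  let s3 := (PySem.List.pyRange 0 (L - 3) 1).foldl
    (fun score n =>
      let w := PySem.List.slice l (some n) (some (n + 4))
      if w = [1, 2, 2, 1] then score - 100
      else if w = [2, 1, 1, 0] ∨ w = [0, 1, 1, 2] then score + 500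
      else if w = [1, 1, 1, 2] ∨ w = [2, 1, 1, 1] then score + 9000
      else if w = [2, 2, 2, 2] then score + 10000
      else if w = [0, 2, 2, 2] ∨ w = [2, 2, 2, 0] then score + 800
      else score) s2
  (PySem.List.pyRange 0 (L - 4) 1).foldl
    (fun score n =>
      let w := PySem.List.slice l (some n) (some (n + 5))
      if w = [0, 2, 2, 2, 0] then score + 900
      else if w = [1, 2, 2, 2, 1] then score - 100
      else score) s3

-- ===== PORT B =====
-- _PTS.get(key, 0): first-match lookup in the dict's (distinct-key) entry list
def pvFind : List (List Int × Int) → List Int → Int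
  | [], _ => 0
  | (p, v) :: t, w => if w = p then v else pvFind t w

def pvPts : List (List Int × Int) :=
  [([2, 2], 50),
   ([1, 2, 1], -100),
   ([1, 2, 2, 1], -100), ([2, 1, 1, 0], 500), ([0, 1, 1, 2], 500),
   ([1, 1, 1, 2], 9000), ([2, 1, 1, 1], 9000), ([2, 2, 2, 2], 10000),
   ([0, 2, 2, 2], 800), ([2, 2, 2, 0], 800),
   ([0, 2, 2, 2, 0], 900), ([1, 2, 2, 2, 1], -100)]

-- e = x if 0 <= x <= 2 else -1
def pvNorm (x : Int) : Int := if 0 ≤ x ∧ x ≤ 2 then x else -1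

-- loop body: shift registers (a,b,c,d) and add the scores of windows ending at x
def pvStep (st : Int × Int × Int × Int × Int) (x : Int) : Int × Int × Int × Int × Int :=
  match st with
  | (a, b, c, d, score) =>
    let e := pvNorm x
    (b, c, d, e,
     score + (pvFind pvPts [d, e] + pvFind pvPts [c, d, e]
              + pvFind pvPts [b, c, d, e] + pvFind pvPts [a, b, c, d, e]))

def list_score_alt (l : List Int) : Int :=
  (l.foldl pvStep (-1, -1, -1, -1, 0)).2.2.2.2

-- ===== PRECONDITION & SPEC =====
def Spec_list_score (l : List Int) (out : Int) : Prop := out = list_score_alt l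
instance (l : List Int) (out : Int) : Decidable (Spec_list_score l out) := by unfold Spec_list_score; infer_instance

-- ===== CLAIM (what is proved, stated in full; the proofs are below) =====
def Claim_equal_list_score : Prop := ∀ (l : List Int), Dom_list_score l → Spec_list_score l (list_score l)

-- ===== LEMMAS AND PROOFS =====

-- per-length pattern tables (pvPts split by key length; proof-side only)
def pvT2 : List (List Int × Int) := [([2, 2], 50)]
def pvT3 : List (List Int × Int) := [([1, 2, 1], -100)]
def pvT4 : List (List Int × Int) :=
  [([1, 2, 2, 1], -100), ([2, 1, 1, 0], 500), ([0, 1, 1, 2], 500),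
   ([1, 1, 1, 2], 9000), ([2, 1, 1, 1], 9000), ([2, 2, 2, 2], 10000),
   ([0, 2, 2, 2], 800), ([2, 2, 2, 0], 800)]
def pvT5 : List (List Int × Int) := [([0, 2, 2, 2, 0], 900), ([1, 2, 2, 2, 1], -100)]

-- window sum over all suffixes
def sumWin (g : List Int → Int) : List Int → Int
  | [] => 0
  | x :: r => g (x :: r) + sumWin g r

def gAll (s : List Int) : Int :=
  pvFind pvT2 (s.take 2) + pvFind pvT3 (s.take 3) +
  pvFind pvT4 (s.take 4) + pvFind pvT5 (s.take 5)

-- scores of all windows lying entirely inside the register block [a,b,c,d]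
def pvC (a b c d : Int) : Int :=
  pvFind pvT2 [a, b] + pvFind pvT2 [b, c] + pvFind pvT2 [c, d] +
  pvFind pvT3 [a, b, c] + pvFind pvT3 [b, c, d] + pvFind pvT4 [a, b, c, d]

-- B's per-element emission, as a recursion (the fold's score component)
def pvV (a b c d : Int) : List Int → Int
  | [] => 0
  | x :: r =>
    let e := pvNorm x
    pvFind pvPts [d, e] + pvFind pvPts [c, d, e]
      + pvFind pvPts [b, c, d, e] + pvFind pvPts [a, b, c, d, e] + pvV b c d e r

lemma fold_inv (l : List Int) : ∀ (a b c d s : Int),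
    (l.foldl pvStep (a, b, c, d, s)).2.2.2.2 = s + pvV a b c d l := by
  induction l with
  | nil => intro a b c d s; simp [pvV]
  | cons x r ih =>
      intro a b c d s
      simp only [List.foldl_cons, pvStep, pvV, ih]
      ring

-- a table whose keys all have length k misses every shorter window
lemma pvFind_short {k : Nat} {t : List (List Int × Int)} (hk : ∀ p ∈ t, p.1.length = k)
    (s : List Int) (h : s.length < k) : pvFind t s = 0 := by
  induction t with
  | nil => rfl
  | cons p t ih =>
      obtain ⟨q, v⟩ := p
      have hne : s ≠ q := by
        intro he
        have hq := hk (q, v) (List.mem_cons_self ..)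
        rw [← he] at hq; simp at hq; omega
      simp only [pvFind, if_neg hne]
      exact ih (fun u hu => hk u (List.mem_cons_of_mem _ hu))

-- A's map-sum over window start indices equals the suffix recursion
lemma sum_range_windows (k : Nat) (hk : 0 < k) (g : List Int → Int)
    (hg : ∀ s, s.length < k → g s = 0) (l : List Int) :
    ((List.range (l.length + 1 - k)).map (fun j => g ((l.drop j).take k))).sum =
      sumWin (fun s => g (s.take k)) l := by
  induction l with
  | nil =>
      have h0 : (0 : Nat) + 1 - k = 0 := by omega
      simp [h0, sumWin]
  | cons x r ih =>
      by_cases hle : k ≤ r.length + 1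
      · have hlen : (x :: r).length + 1 - k = (r.length + 1 - k) + 1 := by
          simp only [List.length_cons]; omega
        rw [hlen, List.range_succ_eq_map, List.map_cons, List.sum_cons, List.map_map]
        simp only [sumWin, List.drop_zero, Function.comp_def, List.drop_succ_cons, ih]
      · have hlen : (x :: r).length + 1 - k = 0 := by
          simp only [List.length_cons]; omega
        have hlen' : r.length + 1 - k = 0 := by omega
        rw [hlen]
        simp only [List.range_zero, List.map_nil, List.sum_nil, sumWin]
        have h1 : g ((x :: r).take k) = 0 := by
          apply hg
          simp only [List.length_take, List.length_cons]
          omega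
        have h2 : sumWin (fun s => g (s.take k)) r = 0 := by
          rw [← ih, hlen']; simp
        rw [h1, h2]; ring

-- A's foldl loop over pyRange, rewritten as init + map-sum over Nat range
lemma foldl_loop (ci ki : Int) (k : Nat) (hc : ci = (k : Int) - 1) (hki : ki = (k : Int))
    (g : List Int → Int) (l : List Int) (init : Int) :
    (PySem.List.pyRange 0 ((l.length : Int) - ci) 1).foldl
        (fun s n => s + g (PySem.List.slice l (some n) (some (n + ki)))) init =
      init + ((List.range (l.length + 1 - k)).map (fun j => g ((l.drop j).take k))).sum := by
  subst hc hki
  rw [PySem.List.pyRange_one, List.foldl_map, PySem.List.foldl_add]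
  congr 1
  have hM : (((l.length : Int) - ((k : Int) - 1)) - 0).toNat = l.length + 1 - k := by omega
  rw [hM]
  apply congrArg
  apply List.map_congr_left
  intro j hj
  simp only [zero_add]
  congr 1
  rw [PySem.List.slice_toNat _ (by positivity) (by positivity)]
  have e1 : ((j : Int)).toNat = j := Int.toNat_natCast j
  have e2 : ((j : Int) + (k : Int)).toNat = j + k := by omega
  rw [e1, e2, Nat.add_sub_cancel_left]

-- pointwise: each of A's loop bodies is "add the per-length table score of the window"
lemma body2 (w : List Int) (s : Int) :
    (if w = [2, 2] then s + 50 else s) = s + pvFind pvT2 w := by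
  split_ifs with h
  · subst h; norm_num [pvFind, pvT2]
  · simp [pvFind, pvT2, h]

lemma body3 (w : List Int) (s : Int) :
    (if w = [1, 2, 1] then s - 100 else s) = s + pvFind pvT3 w := by
  split_ifs with h
  · subst h; norm_num [pvFind, pvT3]; ring
  · simp [pvFind, pvT3, h]

lemma body4 (w : List Int) (s : Int) :
    (if w = [1, 2, 2, 1] then s - 100
     else if w = [2, 1, 1, 0] ∨ w = [0, 1, 1, 2] then s + 500
     else if w = [1, 1, 1, 2] ∨ w = [2, 1, 1, 1] then s + 9000
     else if w = [2, 2, 2, 2] then s + 10000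
     else if w = [0, 2, 2, 2] ∨ w = [2, 2, 2, 0] then s + 800
     else s) = s + pvFind pvT4 w := by
  split_ifs with h1 h2 h3 h4 h5
  · subst h1; norm_num [pvFind, pvT4]; ring
  · rcases h2 with rfl | rfl <;> norm_num [pvFind, pvT4]
  · rcases h3 with rfl | rfl <;> norm_num [pvFind, pvT4]
  · subst h4; norm_num [pvFind, pvT4]
  · rcases h5 with rfl | rfl <;> norm_num [pvFind, pvT4]
  · push Not at h2 h3 h5
    simp [pvFind, pvT4, h1, h2.1, h2.2, h3.1, h3.2, h4, h5.1, h5.2]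

lemma body5 (w : List Int) (s : Int) :
    (if w = [0, 2, 2, 2, 0] then s + 900
     else if w = [1, 2, 2, 2, 1] then s - 100
     else s) = s + pvFind pvT5 w := by
  split_ifs with h1 h2
  · subst h1; norm_num [pvFind, pvT5]
  · subst h2; norm_num [pvFind, pvT5]; ring
  · simp [pvFind, pvT5, h1, h2]

-- ----- the combined table pvPts, restricted to a window of known length -----
lemma pts2 (d e : Int) : pvFind pvPts [d, e] = pvFind pvT2 [d, e] := by
  simp [pvFind, pvPts, pvT2]

lemma pts3 (c d e : Int) : pvFind pvPts [c, d, e] = pvFind pvT3 [c, d, e] := by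
  simp [pvFind, pvPts, pvT3]

lemma pts4 (b c d e : Int) : pvFind pvPts [b, c, d, e] = pvFind pvT4 [b, c, d, e] := by
  simp [pvFind, pvPts, pvT4]

lemma pts5 (a b c d e : Int) : pvFind pvPts [a, b, c, d, e] = pvFind pvT5 [a, b, c, d, e] := by
  simp [pvFind, pvPts, pvT5]

-- ----- normalization invariance -----
lemma norm_eq_iff (x v : Int) (hv : v = 0 ∨ v = 1 ∨ v = 2) : pvNorm x = v ↔ x = v := by
  unfold pvNorm
  split_ifs with h
  · exact Iff.rfl
  · constructor <;> intro h' <;> omega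

lemma mapNorm_eq_iff : ∀ (w p : List Int), (∀ v ∈ p, v = 0 ∨ v = 1 ∨ v = 2) →
    (w.map pvNorm = p ↔ w = p) := by
  intro w
  induction w with
  | nil => intro p _; cases p <;> simp
  | cons x r ih =>
      intro p hp
      cases p with
      | nil => simp
      | cons q t =>
          simp only [List.map_cons, List.cons.injEq]
          rw [norm_eq_iff x q (hp q (List.mem_cons_self ..)),
              ih t (fun v hv => hp v (List.mem_cons_of_mem _ hv))]

lemma pvFind_map (t : List (List Int × Int))
    (ht : ∀ q ∈ t, ∀ v ∈ q.1, v = 0 ∨ v = 1 ∨ v = 2) (w : List Int) :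
    pvFind t (w.map pvNorm) = pvFind t w := by
  induction t with
  | nil => rfl
  | cons q t ih =>
      obtain ⟨p, v⟩ := q
      have hiff := mapNorm_eq_iff w p (ht (p, v) (List.mem_cons_self ..))
      by_cases h : w = p
      · have h' : w.map pvNorm = p := hiff.mpr h
        simp only [pvFind, if_pos h, if_pos h']
      · have h' : ¬ w.map pvNorm = p := fun hh => h (hiff.mp hh)
        simp only [pvFind, if_neg h, if_neg h']
        exact ih (fun u hu => ht u (List.mem_cons_of_mem _ hu))

lemma gAll_map (s : List Int) : gAll (s.map pvNorm) = gAll s := by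
  simp only [gAll, ← List.map_take]
  rw [pvFind_map pvT2 (by decide), pvFind_map pvT3 (by decide),
      pvFind_map pvT4 (by decide), pvFind_map pvT5 (by decide)]

-- a window starting with the sentinel -1 scores 0
lemma gAll_neg (s : List Int) : gAll (-1 :: s) = 0 := by
  have h2 : pvFind pvT2 ((-1 : Int) :: s.take 1) = 0 := by simp [pvFind, pvT2]
  have h3 : pvFind pvT3 ((-1 : Int) :: s.take 2) = 0 := by simp [pvFind, pvT3]
  have h4 : pvFind pvT4 ((-1 : Int) :: s.take 3) = 0 := by simp [pvFind, pvT4]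
  have h5 : pvFind pvT5 ((-1 : Int) :: s.take 4) = 0 := by simp [pvFind, pvT5]
  simp [gAll, List.take, h2, h3, h4, h5]

-- the emission recursion equals suffix window sums of the padded sequence,
-- minus the windows lying inside the register block
lemma V_eq : ∀ (l : List Int) (a b c d : Int),
    pvV a b c d l = sumWin gAll ([a, b, c, d] ++ l.map pvNorm) - pvC a b c d := by
  intro l
  induction l with
  | nil =>
      intro a b c d
      show (0 : Int) = _
      simp only [List.map_nil, List.append_nil, sumWin, gAll, pvC, List.take]
      ring_nf
      simp [pvFind, pvT3, pvT4, pvT5]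
      simp [pvFind, pvT2]
  | cons x r ih =>
      intro a b c d
      simp only [pvV, List.map_cons, List.cons_append, List.nil_append]
      have hU : sumWin gAll (a :: b :: c :: d :: pvNorm x :: r.map pvNorm) =
          gAll (a :: b :: c :: d :: pvNorm x :: r.map pvNorm) +
          sumWin gAll ([b, c, d, pvNorm x] ++ r.map pvNorm) := by
        simp [sumWin]
      rw [hU, ih b c d (pvNorm x)]
      have hg : gAll (a :: b :: c :: d :: pvNorm x :: r.map pvNorm) =
          pvFind pvT2 [a, b] + pvFind pvT3 [a, b, c] + pvFind pvT4 [a, b, c, d] +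
          pvFind pvT5 [a, b, c, d, pvNorm x] := by
        simp [gAll, List.take]
      rw [hg, pts2, pts3, pts4, pts5]
      simp only [pvC]
      ring

lemma U_map (l : List Int) : sumWin gAll (l.map pvNorm) = sumWin gAll l := by
  induction l with
  | nil => rfl
  | cons x r ih =>
      simp only [List.map_cons, sumWin, ih]
      rw [show pvNorm x :: r.map pvNorm = ((x :: r).map pvNorm) from rfl, gAll_map]

-- A equals the suffix window sum of the raw list
lemma A_eq_U (l : List Int) : list_score l = sumWin gAll l := by
  simp only [list_score]
  rw [show (fun (score n : Int) =>
        if PySem.List.slice l (some n) (some (n + 2)) = [2, 2] then score + 50 else score) =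
      (fun s n => s + pvFind pvT2 (PySem.List.slice l (some n) (some (n + 2)))) from
    funext fun s => funext fun n => body2 _ s]
  rw [show (fun (score n : Int) =>
        if PySem.List.slice l (some n) (some (n + 3)) = [1, 2, 1] then score - 100 else score) =
      (fun s n => s + pvFind pvT3 (PySem.List.slice l (some n) (some (n + 3)))) from
    funext fun s => funext fun n => body3 _ s]
  rw [show (fun (score n : Int) =>
        let w := PySem.List.slice l (some n) (some (n + 4))
        if w = [1, 2, 2, 1] then score - 100
        else if w = [2, 1, 1, 0] ∨ w = [0, 1, 1, 2] then score + 500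
        else if w = [1, 1, 1, 2] ∨ w = [2, 1, 1, 1] then score + 9000
        else if w = [2, 2, 2, 2] then score + 10000
        else if w = [0, 2, 2, 2] ∨ w = [2, 2, 2, 0] then score + 800
        else score) =
      (fun s n => s + pvFind pvT4 (PySem.List.slice l (some n) (some (n + 4)))) from
    funext fun s => funext fun n => body4 _ s]
  rw [show (fun (score n : Int) =>
        let w := PySem.List.slice l (some n) (some (n + 5))
        if w = [0, 2, 2, 2, 0] then score + 900
        else if w = [1, 2, 2, 2, 1] then score - 100
        else score) =
      (fun s n => s + pvFind pvT5 (PySem.List.slice l (some n) (some (n + 5)))) from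
    funext fun s => funext fun n => body5 _ s]
  rw [foldl_loop 1 2 2 (by norm_num) (by norm_num),
      foldl_loop 2 3 3 (by norm_num) (by norm_num),
      foldl_loop 3 4 4 (by norm_num) (by norm_num),
      foldl_loop 4 5 5 (by norm_num) (by norm_num)]
  rw [sum_range_windows 2 (by norm_num) _ (pvFind_short (by decide)) l,
      sum_range_windows 3 (by norm_num) _ (pvFind_short (by decide)) l,
      sum_range_windows 4 (by norm_num) _ (pvFind_short (by decide)) l,
      sum_range_windows 5 (by norm_num) _ (pvFind_short (by decide)) l]
  have hsum : ∀ m : List Int,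
      sumWin (fun s => pvFind pvT2 (s.take 2)) m + sumWin (fun s => pvFind pvT3 (s.take 3)) m +
      sumWin (fun s => pvFind pvT4 (s.take 4)) m + sumWin (fun s => pvFind pvT5 (s.take 5)) m =
      sumWin gAll m := by
    intro m
    induction m with
    | nil => simp [sumWin]
    | cons y t iht => simp only [sumWin, gAll, ← iht]; ring
  rw [zero_add, ← hsum l]

-- ===== VERDICT (by name: the statement is the Claim_ definition above) =====
theorem list_score_spec : Claim_equal_list_score := by
  intro l _
  show list_score l = list_score_alt l
  have hB : list_score_alt l = pvV (-1) (-1) (-1) (-1) l := by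
    simp [list_score_alt, fold_inv]
  rw [hB, V_eq]
  have hC : pvC (-1) (-1) (-1) (-1) = 0 := by decide
  have hpad : sumWin gAll ([-1, -1, -1, -1] ++ l.map pvNorm) = sumWin gAll (l.map pvNorm) := by
    simp [sumWin, gAll_neg]
  rw [hC, hpad, U_map, sub_zero, A_eq_U]
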